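-- pv_equiv track=rewrite | github.com/hangisu30-arch/autopj | app/validation/generated_project_validator.py | _infer_id_field
-- ===== SOURCE A (Python) =====
-- from typing import Any, Dict, List, Optional
--
-- def _infer_id_field(props: List[Dict[str, str]]) -> Dict[str, str]:
--     if not props:
--         return {}
--
--     def _is_boolean_like(type_name: str) -> bool:
--         simple = (type_name or '').strip().split('.')[-1].lower()
--         return simple in {'boolean', 'bool'}
--
--     exact = {'id', 'seq', 'no'}
--     non_boolean_props = [item for item in props if not _is_boolean_like(item.get('type') or '')]
--     candidates = non_boolean_props or props
--     for item in candidates: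
--         if item['name'].lower() in exact:
--             return item
--     for item in candidates:
--         low = item['name'].lower()
--         if low.endswith('id') or low.endswith('_id'):
--             return item
--     for item in candidates:
--         low = item['name'].lower()
--         if 'id' in low or 'seq' in low or low.endswith('no'):
--             return item
--     return candidates[0] if candidates else {}
-- ===== SOURCE B (Python) =====
-- from typing import Any, Dict, List, Optional
--
-- def _infer_id_field(props: List[Dict[str, str]]) -> Dict[str, str]:
--     if not props:
--         return {}
--
--     def _is_boolean_like(type_name: str) -> bool:
--         simple = (type_name or '').strip().split('.')[-1].lower()
--         return simple in {'boolean', 'bool'}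
--
--     def _tier(name: str) -> int:
--         low = name.lower()
--         if low in {'id', 'seq', 'no'}:
--             return 0
--         if low.endswith('id'):
--             return 1
--         if 'id' in low or 'seq' in low or low.endswith('no'):
--             return 2
--         return 3
--
--     non_boolean_props = [item for item in props if not _is_boolean_like(item.get('type') or '')]
--     candidates = non_boolean_props or props
--     best = candidates[0]
--     best_t = _tier(best['name'])
--     for item in candidates[1:]:
--         t = _tier(item['name'])
--         if t < best_t:
--             best, best_t = item, t
--     return best
-- ===== Notes on version B (the rewrite author's own statement) =====
-- stated objective: alternative
-- what changed: Replaces A's four sequential early-return scans over the candidates by a single pass that scores each item with a priority tier (0=exact id/seq/no, 1=ends with id, 2=contains id/seq or ends with no, 3=other) and keeps the first item with the smallest tier; the all-tier-3 case naturally yields candidates[0], matching A's fallback.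
-- outside the precondition, e.g. on _infer_id_field([{'name': 'id'}, {'type': 'int'}]): A returns {'name': 'id'}, B raises KeyError
import Mathlib
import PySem

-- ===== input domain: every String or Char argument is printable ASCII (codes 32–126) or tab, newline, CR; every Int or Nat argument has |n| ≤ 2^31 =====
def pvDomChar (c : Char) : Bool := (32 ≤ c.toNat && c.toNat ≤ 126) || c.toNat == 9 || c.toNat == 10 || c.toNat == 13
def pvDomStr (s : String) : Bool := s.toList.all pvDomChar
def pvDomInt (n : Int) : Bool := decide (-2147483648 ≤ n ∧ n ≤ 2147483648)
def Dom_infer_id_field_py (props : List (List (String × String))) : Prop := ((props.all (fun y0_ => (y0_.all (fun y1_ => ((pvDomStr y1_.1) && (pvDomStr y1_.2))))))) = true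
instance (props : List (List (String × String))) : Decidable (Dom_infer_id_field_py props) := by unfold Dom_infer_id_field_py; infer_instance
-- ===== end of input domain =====

-- B replaces A's four sequential early-return scans by one scoring pass keeping the first minimal-tier item (alternative decomposition, same cost); equivalence is proved on inputs whose candidate dicts all carry a 'name' key (A raises KeyError on the rest except when an exact match precedes the nameless item).

-- ===== PORT A =====
-- shared helpers: both Pythons contain this identical code (dict.get = first match on the assoc list)
def pvGetStr (d : List (String × String)) (k : String) : Option String :=
  (d.find? (fun p => p.1 == k)).map (·.2)

-- _is_boolean_like: (type_name or '').strip().split('.')[-1].lower() in {'boolean','bool'}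
-- (split('.') is never empty, so the [-1] default is unreachable)
def pvIsBooleanLike (type_name : String) : Bool :=
  -- split? with the nonempty separator "." always returns some, so the getD defaults are unreachable
  let simple := PySem.Str.lower ((PySem.List.pyGet? ((PySem.Str.split? (PySem.Str.strip type_name) ".").getD []) (-1)).getD "")
  simple == "boolean" || simple == "bool"

-- candidates = [item for item in props if not _is_boolean_like(item.get('type') or '')] or props
-- ('x or ""' on a string equals getD "" since '' or '' == '')
def pvCandidates (props : List (List (String × String))) : List (List (String × String)) :=
  let nb := props.filter (fun it => !pvIsBooleanLike ((pvGetStr it "type").getD ""))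
  if nb.isEmpty then props else nb

-- item['name']; KeyError (the getD "" default) is excluded by Pre_
def pvName (it : List (String × String)) : String := (pvGetStr it "name").getD ""

-- the four loops of A: three early-return scans, then candidates[0]
def pvScanA (cand : List (List (String × String))) : List (String × String) :=
  match cand.find? (fun it =>
      let low := PySem.Str.lower (pvName it)
      low == "id" || low == "seq" || low == "no") with
  | some it => it
  | none =>
    match cand.find? (fun it =>
        let low := PySem.Str.lower (pvName it)
        PySem.Str.endswith low "id" || PySem.Str.endswith low "_id") with
    | some it => it
    | none =>
      match cand.find? (fun it =>
          let low := PySem.Str.lower (pvName it)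
          PySem.Str.isIn "id" low || PySem.Str.isIn "seq" low || PySem.Str.endswith low "no") with
      | some it => it
      | none => cand.headD []

def infer_id_field_py (props : List (List (String × String))) : List (String × String) :=
  if props.isEmpty then [] else pvScanA (pvCandidates props)

-- ===== PORT B =====
-- _tier(name): priority 0..3
def pvTier (name : String) : Int :=
  let low := PySem.Str.lower name
  if low == "id" || low == "seq" || low == "no" then 0
  else if PySem.Str.endswith low "id" then 1
  else if PySem.Str.isIn "id" low || PySem.Str.isIn "seq" low || PySem.Str.endswith low "no" then 2
  else 3

-- loop body: if t < best_t: best, best_t = item, t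
def pvStep (best : (List (String × String)) × Int) (it : List (String × String)) :
    (List (String × String)) × Int :=
  let t := pvTier (pvName it)
  if t < best.2 then (it, t) else best

-- best = candidates[0]; for item in candidates[1:]: …; return best
def pvScanB (cand : List (List (String × String))) : List (String × String) :=
  match cand with
  | [] => []
  | x :: xs => (xs.foldl pvStep (x, pvTier (pvName x))).1

def infer_id_field_py_alt (props : List (List (String × String))) : List (String × String) :=
  if props.isEmpty then [] else pvScanB (pvCandidates props)

-- ===== PRECONDITION & SPEC =====
def pvHasName (it : List (String × String)) : Bool := it.any (fun p => p.1 == "name")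

-- Pre_ excludes inputs where some candidate dict lacks the 'name' key: there A raises KeyError,
-- except when an item named exactly id/seq/no precedes the nameless candidate, in which case A
-- returns early while B's single scoring pass (which reads every candidate's name) raises.
def Pre_infer_id_field_py (props : List (List (String × String))) : Prop :=
  ∀ it ∈ pvCandidates props, pvHasName it = true

instance (props : List (List (String × String))) : Decidable (Pre_infer_id_field_py props) := by
  unfold Pre_infer_id_field_py; infer_instance

def pvWitness_infer_id_field_py : (List (List (String × String))) := [[("name", "id")], [("name", "x"), ("type", "int")]]

def Spec_infer_id_field_py (props : List (List (String × String))) (out : List (String × String)) : Prop := out = infer_id_field_py_alt props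
instance (props : List (List (String × String))) (out : List (String × String)) : Decidable (Spec_infer_id_field_py props out) := by unfold Spec_infer_id_field_py; infer_instance

-- ===== CLAIM (what is proved, stated in full; the proofs are below) =====
def Claim_equal_infer_id_field_py : Prop := ∀ (props : List (List (String × String))), Dom_infer_id_field_py props → Pre_infer_id_field_py props → Spec_infer_id_field_py props (infer_id_field_py props)

-- ===== LEMMAS AND PROOFS =====

-- minimal tier of a candidate list (3 when empty)
def pvMinT (l : List (List (String × String))) : Int :=
  l.foldr (fun it m => min (pvTier (pvName it)) m) 3

theorem pvTier_bounds (name : String) : 0 ≤ pvTier name ∧ pvTier name ≤ 3 := by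
  simp only [pvTier]
  split_ifs <;> omega

theorem pvMinT_le {l : List (List (String × String))} {it : List (String × String)}
    (h : it ∈ l) : pvMinT l ≤ pvTier (pvName it) := by
  induction l with
  | nil => cases h
  | cons x xs ih =>
    rcases List.mem_cons.mp h with h | h
    · simp [pvMinT, h]
    · have := ih h
      simp only [pvMinT, List.foldr] at *
      omega

theorem pvMinT_attained {l : List (List (String × String))} (h : l ≠ []) :
    ∃ it ∈ l, pvTier (pvName it) = pvMinT l := by
  induction l with
  | nil => exact absurd rfl h
  | cons x xs ih =>
    by_cases hx : xs = []
    · subst hx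
      refine ⟨x, List.mem_cons_self, ?_⟩
      have := pvTier_bounds (pvName x)
      simp only [pvMinT, List.foldr]
      omega
    · obtain ⟨it, hmem, hit⟩ := ih hx
      by_cases hle : pvTier (pvName x) ≤ pvMinT xs
      · refine ⟨x, List.mem_cons_self, ?_⟩
        simp only [pvMinT, List.foldr] at *
        omega
      · refine ⟨it, List.mem_cons_of_mem _ hmem, ?_⟩
        simp only [pvMinT, List.foldr] at *
        omega

theorem pvFind?_congr {α : Type} {p q : α → Bool} :
    ∀ {l : List α}, (∀ x ∈ l, p x = q x) → l.find? p = l.find? q := by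
  intro l
  induction l with
  | nil => intro _; rfl
  | cons x xs ih =>
    intro h
    have hx := h x List.mem_cons_self
    simp only [List.find?, hx]
    cases q x
    · exact ih (fun y hy => h y (List.mem_cons_of_mem _ hy))
    · rfl

theorem pvEndswith_underscore_id (low : String) (h : PySem.Str.endswith low "_id" = true) :
    PySem.Str.endswith low "id" = true := by
  have h' : ("_id".toList) <:+ low.toList := by
    simpa [PySem.Chars.endswith_iff] using h
  have : ("id".toList) <:+ low.toList :=
    List.IsSuffix.trans (by decide) h'
  simpa [PySem.Chars.endswith_iff] using this

-- the tier reads off the three scan predicates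
theorem pvTier_eq_zero (name : String) :
    (PySem.Str.lower name == "id" || PySem.Str.lower name == "seq" || PySem.Str.lower name == "no")
      = (pvTier name == 0) := by
  simp only [pvTier]
  split_ifs with h1 h2 h3 <;> simp_all

theorem pvTier_eq_one (name : String) (h0 : ¬ (pvTier name = 0)) :
    (PySem.Str.endswith (PySem.Str.lower name) "id" || PySem.Str.endswith (PySem.Str.lower name) "_id")
      = (pvTier name == 1) := by
  simp only [pvTier] at h0 ⊢
  split_ifs at h0 ⊢ with h1 h2 h3
  · exact absurd rfl h0
  · simp only [h2, Bool.true_or]; decide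
  · have h2f : PySem.Str.endswith (PySem.Str.lower name) "id" = false := by simpa using h2
    have h2' : PySem.Str.endswith (PySem.Str.lower name) "_id" = false := by
      cases he : PySem.Str.endswith (PySem.Str.lower name) "_id"
      · rfl
      · exact absurd (pvEndswith_underscore_id _ he) (by rw [h2f]; decide)
    rw [h2f, h2']; decide
  · have h2f : PySem.Str.endswith (PySem.Str.lower name) "id" = false := by simpa using h2
    have h2' : PySem.Str.endswith (PySem.Str.lower name) "_id" = false := by
      cases he : PySem.Str.endswith (PySem.Str.lower name) "_id"
      · rfl
      · exact absurd (pvEndswith_underscore_id _ he) (by rw [h2f]; decide)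
    rw [h2f, h2']; decide

theorem pvTier_eq_two (name : String) (h0 : ¬ (pvTier name = 0)) (h1 : ¬ (pvTier name = 1)) :
    (PySem.Str.isIn "id" (PySem.Str.lower name) || PySem.Str.isIn "seq" (PySem.Str.lower name)
      || PySem.Str.endswith (PySem.Str.lower name) "no")
      = (pvTier name == 2) := by
  simp only [pvTier] at h0 h1 ⊢
  split_ifs at h0 h1 ⊢ with g1 g2 g3 <;> simp_all

theorem pvTier_three_of (name : String)
    (h0 : ¬ (pvTier name = 0)) (h1 : ¬ (pvTier name = 1)) (h2 : ¬ (pvTier name = 2)) :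
    pvTier name = 3 := by
  have := pvTier_bounds name
  omega

-- A's scan chain returns the first element attaining the minimal tier
theorem pvScanA_eq_pick (l : List (List (String × String))) :
    pvScanA l = (l.find? (fun it => pvTier (pvName it) == pvMinT l)).getD [] := by
  rcases l with _ | ⟨x, xs⟩
  · rfl
  have hne : x :: xs ≠ [] := by simp
  unfold pvScanA
  have e0 : (x :: xs).find? (fun it =>
      let low := PySem.Str.lower (pvName it)
      low == "id" || low == "seq" || low == "no")
      = (x :: xs).find? (fun it => pvTier (pvName it) == 0) :=
    pvFind?_congr (fun it _ => pvTier_eq_zero (pvName it))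
  rw [e0]
  cases hf0 : (x :: xs).find? (fun it => pvTier (pvName it) == 0) with
  | some r =>
    have hmem := List.mem_of_find?_eq_some hf0
    have hr : pvTier (pvName r) = 0 := by
      have := List.find?_some hf0; simpa using this
    have hmin : pvMinT (x :: xs) = 0 := by
      have h1 := pvMinT_le hmem
      obtain ⟨it, hit, hteq⟩ := pvMinT_attained hne
      have := (pvTier_bounds (pvName it)).1
      omega
    simp [hmin, hf0]
  | none =>
    have hno0 : ∀ it ∈ x :: xs, ¬ (pvTier (pvName it) = 0) := by
      intro it hit
      have := List.find?_eq_none.mp hf0 it hit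
      simpa using this
    have e1 : (x :: xs).find? (fun it =>
        let low := PySem.Str.lower (pvName it)
        PySem.Str.endswith low "id" || PySem.Str.endswith low "_id")
        = (x :: xs).find? (fun it => pvTier (pvName it) == 1) :=
      pvFind?_congr (fun it hit => pvTier_eq_one (pvName it) (hno0 it hit))
    rw [e1]
    cases hf1 : (x :: xs).find? (fun it => pvTier (pvName it) == 1) with
    | some r =>
      have hmem := List.mem_of_find?_eq_some hf1
      have hr : pvTier (pvName r) = 1 := by
        have := List.find?_some hf1; simpa using this
      have hmin : pvMinT (x :: xs) = 1 := by
        have h1 := pvMinT_le hmem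
        obtain ⟨it, hit, hteq⟩ := pvMinT_attained hne
        have := (pvTier_bounds (pvName it)).1
        have := hno0 it hit
        omega
      simp [hmin, hf1]
    | none =>
      have hno1 : ∀ it ∈ x :: xs, ¬ (pvTier (pvName it) = 1) := by
        intro it hit
        have := List.find?_eq_none.mp hf1 it hit
        simpa using this
      have e2 : (x :: xs).find? (fun it =>
          let low := PySem.Str.lower (pvName it)
          PySem.Str.isIn "id" low || PySem.Str.isIn "seq" low || PySem.Str.endswith low "no")
          = (x :: xs).find? (fun it => pvTier (pvName it) == 2) :=
        pvFind?_congr (fun it hit => pvTier_eq_two (pvName it) (hno0 it hit) (hno1 it hit))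
      rw [e2]
      cases hf2 : (x :: xs).find? (fun it => pvTier (pvName it) == 2) with
      | some r =>
        have hmem := List.mem_of_find?_eq_some hf2
        have hr : pvTier (pvName r) = 2 := by
          have := List.find?_some hf2; simpa using this
        have hmin : pvMinT (x :: xs) = 2 := by
          have h1 := pvMinT_le hmem
          obtain ⟨it, hit, hteq⟩ := pvMinT_attained hne
          have := (pvTier_bounds (pvName it)).1
          have := hno0 it hit
          have := hno1 it hit
          omega
        simp [hmin, hf2]
      | none =>
        have hno2 : ∀ it ∈ x :: xs, ¬ (pvTier (pvName it) = 2) := by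
          intro it hit
          have := List.find?_eq_none.mp hf2 it hit
          simpa using this
        have hall3 : ∀ it ∈ x :: xs, pvTier (pvName it) = 3 := fun it hit =>
          pvTier_three_of _ (hno0 it hit) (hno1 it hit) (hno2 it hit)
        have hmin : pvMinT (x :: xs) = 3 := by
          obtain ⟨it, hit, hteq⟩ := pvMinT_attained hne
          have := hall3 it hit
          omega
        have hx3 : pvTier (pvName x) = 3 := hall3 x List.mem_cons_self
        rw [List.find?_cons_of_pos (by simp [hx3, hmin])]
        rfl

-- one loop step keeps the (item, its tier) shape
theorem pvStep_shape (x y : List (String × String)) :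
    pvStep (x, pvTier (pvName x)) y
      = (if pvTier (pvName y) < pvTier (pvName x) then y else x,
         pvTier (pvName (if pvTier (pvName y) < pvTier (pvName x) then y else x))) := by
  by_cases h : pvTier (pvName y) < pvTier (pvName x) <;> simp [pvStep, h]

-- B's fold returns the first element attaining the minimal tier
theorem pvFoldB_eq_pick (xs : List (List (String × String))) :
    ∀ x : List (String × String),
      (xs.foldl pvStep (x, pvTier (pvName x))).1
        = ((x :: xs).find? (fun it => pvTier (pvName it) == pvMinT (x :: xs))).getD [] := by
  induction xs with
  | nil =>
    intro x
    have hb := pvTier_bounds (pvName x)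
    have hm : pvMinT [x] = pvTier (pvName x) := by
      simp only [pvMinT, List.foldr]; omega
    simp [List.find?, hm]
  | cons y ys ih =>
    intro x
    have hstep := pvStep_shape x y
    by_cases hy : pvTier (pvName y) < pvTier (pvName x)
    · -- new best is y
      rw [List.foldl_cons, hstep, if_pos hy, ih y]
      have hm : pvMinT (x :: y :: ys) = pvMinT (y :: ys) := by
        simp only [pvMinT, List.foldr]; omega
      have h1 : pvMinT (y :: ys) ≤ pvTier (pvName y) := pvMinT_le List.mem_cons_self
      have hxne : ¬ ((fun it => pvTier (pvName it) == pvMinT (y :: ys)) x = true) := by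
        simp only [beq_iff_eq]; omega
      rw [hm]
      conv_rhs => rw [List.find?_cons_of_neg (p := fun it => pvTier (pvName it) == pvMinT (y :: ys)) hxne]
    · -- best stays x
      rw [List.foldl_cons, hstep, if_neg hy, ih x]
      have hxy : pvTier (pvName x) ≤ pvTier (pvName y) := by omega
      have hm : pvMinT (x :: y :: ys) = pvMinT (x :: ys) := by
        simp only [pvMinT, List.foldr]; omega
      rw [hm]
      by_cases hx : pvTier (pvName x) = pvMinT (x :: ys)
      · have hpos : ((fun it => pvTier (pvName it) == pvMinT (x :: ys)) x = true) := by
          simp [hx]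
        rw [List.find?_cons_of_pos (p := fun it => pvTier (pvName it) == pvMinT (x :: ys)) hpos,
            List.find?_cons_of_pos (p := fun it => pvTier (pvName it) == pvMinT (x :: ys)) hpos]
      · have hmlt : pvMinT (x :: ys) < pvTier (pvName x) := by
          have : pvMinT (x :: ys) ≤ pvTier (pvName x) := pvMinT_le List.mem_cons_self
          omega
        have hxne : ¬ ((fun it => pvTier (pvName it) == pvMinT (x :: ys)) x = true) := by
          simp only [beq_iff_eq]; omega
        have hyne : ¬ ((fun it => pvTier (pvName it) == pvMinT (x :: ys)) y = true) := by
          simp only [beq_iff_eq]; omega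
        rw [List.find?_cons_of_neg (p := fun it => pvTier (pvName it) == pvMinT (x :: ys)) hxne,
            List.find?_cons_of_neg (p := fun it => pvTier (pvName it) == pvMinT (x :: ys)) hxne,
            List.find?_cons_of_neg (p := fun it => pvTier (pvName it) == pvMinT (x :: ys)) hyne]

theorem pvScanA_eq_pvScanB (l : List (List (String × String))) : pvScanA l = pvScanB l := by
  rcases l with _ | ⟨x, xs⟩
  · rfl
  · rw [pvScanA_eq_pick, pvScanB, pvFoldB_eq_pick xs x]

-- ===== VERDICT (by name: the statement is the Claim_ definition above) =====
theorem infer_id_field_py_spec : Claim_equal_infer_id_field_py := by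
  intro props _ _
  unfold Spec_infer_id_field_py infer_id_field_py infer_id_field_py_alt
  by_cases h : props.isEmpty
  · simp [h]
  · simp [h, pvScanA_eq_pvScanB]
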